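-- pv_equiv track=rewrite | github.com/grufghr/advent | advent2023/day07/puzzle.py | calc_strength
-- ===== SOURCE A (Python) =====
-- from collections import Counter
--
-- CARD_VALUES = {
--     'A': 14,
--     'K': 13,
--     'Q': 12,
--     'J': 11,
--     'T': 10,
--     '9': 9,
--     '8': 8,
--     '7': 7,
--     '6': 6,
--     '5': 5,
--     '4': 4,
--     '3': 3,
--     '2': 2,
-- }
--
-- def calc_strength(hand, wildcard):
--     if not wildcard or 'J' not in hand:
--         return calc_hand(hand)
--
--     best_type = calc_hand(hand)
--     # find better type hand with Joker wildcards
--     for wc in CARD_VALUES.keys():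
--         hand_n = hand.replace('J', wc)
--         hand_type = calc_hand(hand_n)
--         if hand_type > best_type:
--             best_type = hand_type
--
--     return best_type
--
-- def calc_hand(hand):
--     count_dict = Counter(hand)
--     count = list(count_dict.values())
--
--     # Five of a kind
--     if 5 in count:
--         return 7
--     # Four of a kind
--     if 4 in count:
--         return 6
--     # Full House
--     if all(x in count for x in [2, 3]):
--         return 5
--     # Three of a kind
--     if 3 in count:
--         return 4
--     if 2 in count:
--         # Two pair
--         if count.count(2) == 2:
--             return 3
--         # One pair
--         else:
--             return 2
--     # High card
--     return 1
-- ===== SOURCE B (Python) =====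
-- from collections import Counter
--
-- CARD_VALUES = {
--     'A': 14, 'K': 13, 'Q': 12, 'J': 11, 'T': 10,
--     '9': 9, '8': 8, '7': 7, '6': 6, '5': 5, '4': 4, '3': 3, '2': 2,
-- }
--
-- def _classify(count):
--     if 5 in count:
--         return 7
--     if 4 in count:
--         return 6
--     if 2 in count and 3 in count:
--         return 5
--     if 3 in count:
--         return 4
--     if 2 in count:
--         return 3 if count.count(2) == 2 else 2
--     return 1
--
-- def calc_strength(hand, wildcard):
--     cnt = Counter(hand)
--     if not wildcard or 'J' not in hand:
--         return _classify(list(cnt.values()))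
--     jokers = cnt.pop('J')
--     rest = list(cnt.values())
--     # the jokers stay their own group (wildcard 'J' itself, or any card absent from the hand)
--     best = _classify(rest + [jokers])
--     # or the jokers merge into one of the card groups already present
--     for c in cnt:
--         if c in CARD_VALUES:
--             best = max(best, _classify([w + jokers if k == c else w for k, w in cnt.items()]))
--     return best
-- ===== Notes on version B (the rewrite author's own statement) =====
-- stated objective: simpler
-- what changed: Instead of rebuilding the hand string and recounting it for each of the 13 candidate replacement cards, B counts the hand once, removes the jokers from the counts, and classifies one count-multiset per distinct card actually present (jokers merged into that group) plus the jokers-alone grouping.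
import Mathlib
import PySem

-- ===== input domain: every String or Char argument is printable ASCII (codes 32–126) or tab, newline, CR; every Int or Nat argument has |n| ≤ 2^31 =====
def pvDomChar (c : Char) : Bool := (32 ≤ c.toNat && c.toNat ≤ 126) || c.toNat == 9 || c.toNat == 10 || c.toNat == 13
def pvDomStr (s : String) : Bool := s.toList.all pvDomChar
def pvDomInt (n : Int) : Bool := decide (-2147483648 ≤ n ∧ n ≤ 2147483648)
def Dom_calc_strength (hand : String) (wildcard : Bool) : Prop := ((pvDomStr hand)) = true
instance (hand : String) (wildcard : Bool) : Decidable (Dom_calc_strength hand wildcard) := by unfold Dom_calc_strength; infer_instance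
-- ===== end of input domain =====

-- B replaces A's 13 string-replace-and-recount passes by one Counter and one candidate
-- count-multiset per distinct card present (jokers merged in) plus the jokers-alone grouping;
-- objective: simpler.

-- ===== PORT A =====
def CARD_VALUES : PySem.Dict Char Int :=
  PySem.Dict.ofList [('A',14),('K',13),('Q',12),('J',11),('T',10),('9',9),('8',8),
                     ('7',7),('6',6),('5',5),('4',4),('3',3),('2',2)]

def calc_hand (hand : String) : Int :=
  let count_dict := PySem.Dict.counter hand.toList
  let count := count_dict.values
  if (5 : Int) ∈ count then 7
  else if (4 : Int) ∈ count then 6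
  else if [(2 : Int), 3].all (fun x => decide (x ∈ count)) then 5
  else if (3 : Int) ∈ count then 4
  else if (2 : Int) ∈ count then (if count.count 2 = 2 then 3 else 2)
  else 1

def calc_strength (hand : String) (wildcard : Bool) : Int :=
  if !wildcard || !(PySem.Str.isIn "J" hand) then calc_hand hand
  else
    let best_type := calc_hand hand
    CARD_VALUES.keys.foldl (fun best_type wc =>
      let hand_n := PySem.Str.replace hand "J" (String.ofList [wc])
      let hand_type := calc_hand hand_n
      if hand_type > best_type then hand_type else best_type) best_type

-- ===== PORT B =====
def classifyB (count : List Int) : Int :=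
  if (5 : Int) ∈ count then 7
  else if (4 : Int) ∈ count then 6
  else if (2 : Int) ∈ count ∧ (3 : Int) ∈ count then 5
  else if (3 : Int) ∈ count then 4
  else if (2 : Int) ∈ count then (if count.count 2 = 2 then 3 else 2)
  else 1

def calc_strength_alt (hand : String) (wildcard : Bool) : Int :=
  let cnt := PySem.Dict.counter hand.toList
  if !wildcard || !(PySem.Str.isIn "J" hand) then classifyB cnt.values
  else
    -- cnt.pop('J'): read the joker count, drop the key ('J' ∈ hand holds here)
    let jokers := cnt.getD 'J' 0
    let cnt2 := cnt.erase 'J'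
    let rest := cnt2.values
    let best := classifyB (rest ++ [jokers])
    cnt2.keys.foldl (fun best c =>
      if CARD_VALUES.contains c then
        max best (classifyB (cnt2.items.map (fun p => if p.1 == c then p.2 + jokers else p.2)))
      else best) best

-- ===== PRECONDITION & SPEC =====
def Spec_calc_strength (hand : String) (wildcard : Bool) (out : Int) : Prop := out = calc_strength_alt hand wildcard
instance (hand : String) (wildcard : Bool) (out : Int) : Decidable (Spec_calc_strength hand wildcard out) := by unfold Spec_calc_strength; infer_instance

-- ===== CLAIM (what is proved, stated in full; the proofs are below) =====
def Claim_equal_calc_strength : Prop := ∀ (hand : String) (wildcard : Bool), Dom_calc_strength hand wildcard → Spec_calc_strength hand wildcard (calc_strength hand wildcard)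

-- ===== LEMMAS AND PROOFS =====
-- -- proof-only helper definitions --

def substJ (wc : Char) (c : Char) : Char := if c = 'J' then wc else c

def cntI (l : List Char) (k : Char) : Int := (l.count k : Int)

def Gd (l : List Char) : List Char := (PySem.Set.ofList l).filter (fun c => !(c == 'J'))

def s0d (l : List Char) : Int := classifyB ((Gd l).map (cntI l) ++ [cntI l 'J'])

def hd (l : List Char) (c : Char) : Int :=
  classifyB ((Gd l).map (fun k => if k = c then cntI l k + cntI l 'J' else cntI l k))

def vAd (l : List Char) (wc : Char) : Int := if wc ∈ Gd l then hd l wc else s0d l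

-- -- max-fold machinery --

theorem le_foldl_max (a : Int) (L : List Int) : a ≤ L.foldl max a := by
  induction L generalizing a with
  | nil => simp
  | cons x t ih => exact le_trans (le_max_left a x) (ih _)

theorem mem_le_foldl_max {x : Int} {L : List Int} (a : Int) (h : x ∈ L) : x ≤ L.foldl max a := by
  induction L generalizing a with
  | nil => cases h
  | cons y t ih =>
    rcases List.mem_cons.1 h with rfl | h'
    · exact le_trans (le_max_right a x) (le_foldl_max _ _)
    · exact ih _ h'

theorem foldl_max_mem_cons (a : Int) (L : List Int) : L.foldl max a ∈ a :: L := by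
  induction L generalizing a with
  | nil => simp
  | cons x t ih =>
    have h := ih (max a x)
    rw [List.foldl_cons]
    rcases List.mem_cons.1 h with h' | h'
    · rcases max_choice a x with e | e <;> rw [h', e] <;> simp
    · exact List.mem_cons.2 (Or.inr (List.mem_cons.2 (Or.inr h')))

theorem foldl_max_eq_of_mem_iff {a : Int} {L1 L2 : List Int}
    (h : ∀ x, x ∈ a :: L1 ↔ x ∈ a :: L2) : L1.foldl max a = L2.foldl max a := by
  apply le_antisymm
  · rcases List.mem_cons.1 ((h _).1 (foldl_max_mem_cons a L1)) with e | e
    · rw [e]; exact le_foldl_max _ _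
    · exact mem_le_foldl_max _ e
  · rcases List.mem_cons.1 ((h _).2 (foldl_max_mem_cons a L2)) with e | e
    · rw [e]; exact le_foldl_max _ _
    · exact mem_le_foldl_max _ e

theorem foldl_ite_gt {α : Type} (L : List α) (f : α → Int) (a : Int) :
    L.foldl (fun b x => if f x > b then f x else b) a = (L.map f).foldl max a := by
  induction L generalizing a with
  | nil => rfl
  | cons x t ih =>
    rw [List.foldl_cons, List.map_cons, List.foldl_cons, ih]
    congr 1
    rw [max_def]
    split_ifs <;> omega

theorem foldl_ite_filter_max {α : Type} (L : List α) (p : α → Bool) (f : α → Int) (a : Int) :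
    L.foldl (fun b x => if p x then max b (f x) else b) a = ((L.filter p).map f).foldl max a := by
  induction L generalizing a with
  | nil => rfl
  | cons x t ih => by_cases h : p x <;> simp [List.foldl_cons, h, ih]

-- -- classification only depends on the multiset of counts --

theorem classifyB_perm {a b : List Int} (h : a.Perm b) : classifyB a = classifyB b := by
  unfold classifyB
  simp only [h.mem_iff, h.count_eq]

-- -- str.replace with a single-character pattern is a character map --

theorem replace_go_eq (wc : Char) (l acc : List Char) (fuel : Nat) (h : l.length ≤ fuel) :
    PySem.Chars.replace.go ['J'] [wc] fuel l acc = acc.reverse ++ l.map (substJ wc) := by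
  induction l generalizing acc fuel with
  | nil => cases fuel <;> simp [PySem.Chars.replace.go]
  | cons c t ih =>
    cases fuel with
    | zero => simp at h
    | succ n =>
      rw [PySem.Chars.replace.go]
      by_cases hc : c = 'J'
      · subst hc
        simp only [List.isPrefixOf, BEq.rfl, Bool.and_self, if_true, List.length_cons,
          List.length_nil, Nat.zero_add, List.drop_succ_cons, List.drop_zero, List.reverse_cons,
          List.reverse_nil, List.nil_append]
        rw [ih _ _ (by simpa using Nat.le_of_succ_le_succ h)]
        simp [substJ]
      · have hp : (['J'].isPrefixOf (c :: t)) = false := by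
          simp [List.isPrefixOf]; exact fun e => absurd e.symm hc
        rw [hp]
        simp only [Bool.false_eq_true, if_false]
        rw [ih _ _ (by simpa using Nat.le_of_succ_le_succ h)]
        simp [substJ, hc]

theorem replace_toList (s : String) (wc : Char) :
    (PySem.Str.replace s "J" (String.ofList [wc])).toList = s.toList.map (substJ wc) := by
  have hJ : ("J" : String).toList = ['J'] := by decide
  simp only [PySem.Str.replace, String.toList_ofList, hJ]
  rw [PySem.Chars.replace]
  simp only [List.isEmpty_cons, Bool.false_eq_true, if_false]
  exact replace_go_eq wc s.toList [] s.toList.length le_rfl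

-- -- 'J' in hand --

theorem isIn_J (s : String) : PySem.Str.isIn "J" s = true ↔ 'J' ∈ s.toList := by
  rw [PySem.Str.isIn_iff_infix]
  have hJ : ("J" : String).toList = ['J'] := by decide
  rw [hJ]
  exact List.singleton_infix_iff _ _

-- -- counter characterisations --

theorem counter_values (l : List Char) :
    (PySem.Dict.counter l).values = (PySem.Set.ofList l).map (cntI l) := by
  show ((PySem.Dict.counter l).items).map (·.2) = _
  rw [PySem.Dict.items_counter, List.map_map]
  rfl

theorem counter_erase_items (l : List Char) :
    ((PySem.Dict.counter l).erase 'J').items = (Gd l).map (fun k => (k, cntI l k)) := by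
  show (((PySem.Dict.counter l).items).filter (fun p => !(p.1 == 'J'))) = _
  rw [PySem.Dict.items_counter, List.filter_map]
  rfl

theorem counter_erase_keys (l : List Char) :
    ((PySem.Dict.counter l).erase 'J').keys = Gd l := by
  show (((PySem.Dict.counter l).erase 'J').items).map (·.1) = _
  rw [counter_erase_items, List.map_map]
  exact (List.map_congr_left (g := id) (fun k _ => rfl)).trans (List.map_id _)

theorem counter_erase_values (l : List Char) :
    ((PySem.Dict.counter l).erase 'J').values = (Gd l).map (cntI l) := by
  show (((PySem.Dict.counter l).erase 'J').items).map (·.2) = _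
  rw [counter_erase_items, List.map_map]
  rfl

-- -- counts and membership of the substituted list --

theorem count_map_substJ (wc : Char) (hwc : wc ≠ 'J') (l : List Char) (x : Char) :
    (l.map (substJ wc)).count x =
      if x = wc then l.count wc + l.count 'J'
      else if x = 'J' then 0 else l.count x := by
  have hJw : ('J' = wc) = False := by simp [Ne.symm hwc]
  induction l with
  | nil => simp
  | cons c t ih =>
    simp only [List.map_cons, List.count_cons, ih, substJ]
    by_cases hc : c = 'J' <;> by_cases hxw : x = wc <;> by_cases hxJ : x = 'J' <;>
      by_cases hcx : c = x <;> simp_all [beq_iff_eq] <;> first | omega | exact fun e => hxw e.symm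

theorem mem_map_substJ {l : List Char} {wc : Char} (hJ : 'J' ∈ l) (x : Char) :
    x ∈ l.map (substJ wc) ↔ x = wc ∨ (x ∈ l ∧ x ≠ 'J') := by
  constructor
  · intro h
    rcases List.mem_map.1 h with ⟨c, hc, he⟩
    by_cases h' : c = 'J'
    · left; rw [← he, h']; simp [substJ]
    · right
      have : substJ wc c = c := by simp [substJ, h']
      rw [← he, this]; exact ⟨hc, h'⟩
  · rintro (rfl | ⟨hx, hxJ⟩)
    · exact List.mem_map.2 ⟨'J', hJ, by simp [substJ]⟩
    · exact List.mem_map.2 ⟨x, hx, by simp [substJ, hxJ]⟩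

-- -- membership / nodup facts for Gd --

theorem mem_Gd {l : List Char} {x : Char} : x ∈ Gd l ↔ x ∈ l ∧ x ≠ 'J' := by
  unfold Gd
  simp [List.mem_filter, PySem.Set.mem_ofList]

theorem nodup_Gd (l : List Char) : (Gd l).Nodup :=
  List.Nodup.filter _ (PySem.Set.nodup_ofList l)

theorem perm_F (l : List Char) (hJ : 'J' ∈ l) :
    (PySem.Set.ofList l).Perm (Gd l ++ ['J']) := by
  refine (List.perm_ext_iff_of_nodup (PySem.Set.nodup_ofList l) ?_).2 ?_
  · refine List.Nodup.append (nodup_Gd l) (List.nodup_singleton _) ?_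
    intro a ha hb
    simp only [List.mem_singleton] at hb
    subst hb
    exact (mem_Gd.1 ha).2 rfl
  · intro a
    simp only [PySem.Set.mem_ofList, List.mem_append, mem_Gd, List.mem_singleton]
    constructor
    · intro ha
      by_cases h : a = 'J'
      · exact Or.inr h
      · exact Or.inl ⟨ha, h⟩
    · rintro (⟨h, _⟩ | rfl)
      · exact h
      · exact hJ

-- -- the count multiset of the original hand classifies to s0d --

theorem classify_counter_s0 (l : List Char) (hJ : 'J' ∈ l) :
    classifyB ((PySem.Dict.counter l).values) = s0d l := by
  rw [counter_values, classifyB_perm ((perm_F l hJ).map (cntI l))]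
  rw [List.map_append]
  rfl

-- -- the value A computes for one replacement card --

theorem Avalue (l : List Char) (hJ : 'J' ∈ l) (wc : Char) :
    classifyB ((PySem.Dict.counter (l.map (substJ wc))).values) = vAd l wc := by
  unfold vAd
  by_cases hwc : wc = 'J'
  · subst hwc
    have hmap : l.map (substJ 'J') = l := by
      rw [List.map_congr_left (g := id) (fun c _ => by simp [substJ]; intro h; exact h.symm)]
      exact List.map_id _
    rw [hmap, if_neg (fun h => absurd (mem_Gd.1 h).2 (by simp))]
    exact classify_counter_s0 l hJ
  · set m := l.map (substJ wc) with hm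
    have hcm : ∀ x, x ≠ wc → x ≠ 'J' → m.count x = l.count x := by
      intro x h1 h2
      rw [hm, count_map_substJ wc hwc l x, if_neg h1, if_neg h2]
    have hcw : m.count wc = l.count wc + l.count 'J' := by
      rw [hm, count_map_substJ wc hwc l wc, if_pos rfl]
    by_cases hwl : wc ∈ l
    · have hin : wc ∈ Gd l := mem_Gd.2 ⟨hwl, hwc⟩
      rw [if_pos hin, counter_values]
      have hperm : (PySem.Set.ofList m).Perm (Gd l) := by
        refine (List.perm_ext_iff_of_nodup (PySem.Set.nodup_ofList m) (nodup_Gd l)).2 ?_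
        intro a
        rw [PySem.Set.mem_ofList, mem_map_substJ hJ, mem_Gd]
        constructor
        · rintro (rfl | h)
          · exact ⟨hwl, hwc⟩
          · exact h
        · exact Or.inr
      rw [classifyB_perm (hperm.map (cntI m))]
      unfold hd
      congr 1
      refine List.map_congr_left ?_
      intro k hk
      rcases mem_Gd.1 hk with ⟨hkl, hkJ⟩
      by_cases hkw : k = wc
      · subst hkw
        simp only [cntI, hcw]
        push_cast
        ring
      · simp only [if_neg hkw, cntI, hcm k hkw hkJ]
    · have hnin : wc ∉ Gd l := fun h => hwl (mem_Gd.1 h).1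
      rw [if_neg hnin, counter_values]
      have hperm : (PySem.Set.ofList m).Perm (Gd l ++ [wc]) := by
        refine (List.perm_ext_iff_of_nodup (PySem.Set.nodup_ofList m) ?_).2 ?_
        · refine List.Nodup.append (nodup_Gd l) (List.nodup_singleton _) ?_
          intro a ha hb
          simp only [List.mem_singleton] at hb
          subst hb
          exact hnin ha
        · intro a
          rw [PySem.Set.mem_ofList, mem_map_substJ hJ, List.mem_append, mem_Gd,
            List.mem_singleton]
          tauto
      rw [classifyB_perm (hperm.map (cntI m)), List.map_append]
      unfold s0d
      have h1 : List.map (cntI m) (Gd l) = List.map (cntI l) (Gd l) := by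
        refine List.map_congr_left ?_
        intro k hk
        rcases mem_Gd.1 hk with ⟨hkl, hkJ⟩
        have hkw : k ≠ wc := fun e => hwl (e ▸ hkl)
        simp only [cntI, hcm k hkw hkJ]
      have h0 : l.count wc = 0 := List.count_eq_zero_of_not_mem hwl
      have h2 : List.map (cntI m) [wc] = [cntI l 'J'] := by
        simp only [List.map_cons, List.map_nil, cntI, hcw, h0, Nat.zero_add]
      rw [h1, h2]

-- -- A's plain classification equals B's helper --

theorem calc_hand_eq (s : String) :
    calc_hand s = classifyB ((PySem.Dict.counter s.toList).values) := by
  unfold calc_hand classifyB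
  simp only [List.all_cons, List.all_nil, Bool.and_true, Bool.and_eq_true, decide_eq_true_eq]

-- -- the two sides of the wildcard branch --

theorem A_eq (hand : String) (wildcard : Bool) (hw : wildcard = true) (hJ : 'J' ∈ hand.toList) :
    calc_strength hand wildcard
      = (CARD_VALUES.keys.map (vAd hand.toList)).foldl max (s0d hand.toList) := by
  have hs : PySem.Str.isIn "J" hand = true := (isIn_J hand).2 hJ
  unfold calc_strength
  simp only [hw, hs, Bool.not_true, Bool.or_self, Bool.false_eq_true, if_false]
  rw [PySem.List.foldl_congr_mem _ _
    (fun b wc => if vAd hand.toList wc > b then vAd hand.toList wc else b) _ ?_]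
  · rw [foldl_ite_gt, calc_hand_eq, classify_counter_s0 _ hJ]
  · intro acc wc _
    have : calc_hand (PySem.Str.replace hand "J" (String.ofList [wc])) = vAd hand.toList wc := by
      rw [calc_hand_eq, replace_toList, Avalue _ hJ]
    simp only [this]

theorem B_eq (hand : String) (wildcard : Bool) (hw : wildcard = true) (hJ : 'J' ∈ hand.toList) :
    calc_strength_alt hand wildcard
      = (((Gd hand.toList).filter (fun c => CARD_VALUES.contains c)).map (hd hand.toList)).foldl
          max (s0d hand.toList) := by
  have hs : PySem.Str.isIn "J" hand = true := (isIn_J hand).2 hJ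
  unfold calc_strength_alt
  simp only [hw, hs, Bool.not_true, Bool.or_self, Bool.false_eq_true, if_false]
  rw [PySem.Dict.getD_counter, counter_erase_keys, counter_erase_values, counter_erase_items]
  rw [PySem.List.foldl_congr_mem _ _
    (fun b c => if CARD_VALUES.contains c then max b (hd hand.toList c) else b) _ ?_]
  · rw [foldl_ite_filter_max]
    rfl
  · intro acc c _
    have : ((Gd hand.toList).map (fun k => (k, cntI hand.toList k))).map
        (fun p => if p.1 == c then p.2 + (↑(hand.toList.count 'J') : Int) else p.2)
        = (Gd hand.toList).map (fun k =>
            if k = c then cntI hand.toList k + cntI hand.toList 'J' else cntI hand.toList k) := by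
      rw [List.map_map]
      refine List.map_congr_left ?_
      intro k _
      by_cases hkc : k = c <;> simp [hkc, cntI]
    rw [this]
    rfl

theorem main_else (l : List Char) :
    (CARD_VALUES.keys.map (vAd l)).foldl max (s0d l)
      = (((Gd l).filter (fun c => CARD_VALUES.contains c)).map (hd l)).foldl max (s0d l) := by
  apply foldl_max_eq_of_mem_iff
  intro x
  constructor
  · intro hx
    rcases List.mem_cons.1 hx with rfl | hx
    · exact List.mem_cons_self ..
    · rcases List.mem_map.1 hx with ⟨wc, hwck, rfl⟩
      by_cases hG : wc ∈ Gd l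
      · refine List.mem_cons.2 (Or.inr (List.mem_map.2 ⟨wc, ?_, ?_⟩))
        · exact List.mem_filter.2 ⟨hG, (PySem.Dict.contains_iff_mem_keys _ _).2 hwck⟩
        · unfold vAd; rw [if_pos hG]
      · have he : vAd l wc = s0d l := by unfold vAd; rw [if_neg hG]
        rw [he]; exact List.mem_cons_self ..
  · intro hx
    rcases List.mem_cons.1 hx with rfl | hx
    · exact List.mem_cons_self ..
    · rcases List.mem_map.1 hx with ⟨c, hcf, rfl⟩
      rcases List.mem_filter.1 hcf with ⟨hcG, hcont⟩
      refine List.mem_cons.2 (Or.inr (List.mem_map.2 ⟨c, ?_, ?_⟩))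
      · exact (PySem.Dict.contains_iff_mem_keys _ _).1 hcont
      · unfold vAd; rw [if_pos hcG]

-- ===== VERDICT (by name: the statement is the Claim_ definition above) =====
theorem calc_strength_spec : Claim_equal_calc_strength := by
  unfold Claim_equal_calc_strength
  intro hand wildcard _
  unfold Spec_calc_strength
  by_cases hw : wildcard = true
  · by_cases hs : PySem.Str.isIn "J" hand = true
    · have hJ := (isIn_J hand).1 hs
      rw [A_eq hand wildcard hw hJ, B_eq hand wildcard hw hJ, main_else]
    · have hs' : PySem.Str.isIn "J" hand = false := by simpa using hs
      unfold calc_strength calc_strength_alt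
      simp only [hw, hs', Bool.not_true, Bool.not_false, Bool.or_true, if_true]
      exact calc_hand_eq hand
  · have hw' : wildcard = false := by simpa using hw
    unfold calc_strength calc_strength_alt
    simp only [hw', Bool.not_false, Bool.true_or, if_true]
    exact calc_hand_eq hand
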